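-- pv_equiv track=rewrite | github.com/SirDavidLudwig/advent-of-code-solutions | solutions/2024/21/part1_test.py | is_valid_seq
-- ===== SOURCE A (Python) =====
-- rev_dirs = {
--     'n': 's',
--     'e': 'w',
--     'w': 'e',
--     's': 'n'
-- }
--
-- def is_valid_seq(seq):
--     if len(seq) <= 2:
--         return True
--     x = seq[0]
--     changed = False
--     for c in seq:
--         if c != x:
--             if changed:
--                 return False
--             x = c
--             changed = True
--     return seq[0] != rev_dirs[seq[-1]]
-- ===== SOURCE B (Python) =====
-- rev_dirs = {
--     'n': 's',
--     'e': 'w',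
--     'w': 'e',
--     's': 'n'
-- }
--
-- def is_valid_seq(seq):
--     if len(seq) <= 2:
--         return True
--     tail = seq.lstrip(seq[0])   # drop the leading run
--     if len(set(tail)) > 1:      # remainder not constant => more than one direction change
--         return False
--     return seq[0] != rev_dirs[seq[-1]]
-- ===== Notes on version B (the rewrite author's own statement) =====
-- stated objective: idiomatic
-- what changed: B drops the whole leading run with lstrip and then rejects when the remaining suffix contains more than one distinct character (a set cardinality test), instead of A's state machine that scans with a current value and a changed flag and early-exits.
import Mathlib
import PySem

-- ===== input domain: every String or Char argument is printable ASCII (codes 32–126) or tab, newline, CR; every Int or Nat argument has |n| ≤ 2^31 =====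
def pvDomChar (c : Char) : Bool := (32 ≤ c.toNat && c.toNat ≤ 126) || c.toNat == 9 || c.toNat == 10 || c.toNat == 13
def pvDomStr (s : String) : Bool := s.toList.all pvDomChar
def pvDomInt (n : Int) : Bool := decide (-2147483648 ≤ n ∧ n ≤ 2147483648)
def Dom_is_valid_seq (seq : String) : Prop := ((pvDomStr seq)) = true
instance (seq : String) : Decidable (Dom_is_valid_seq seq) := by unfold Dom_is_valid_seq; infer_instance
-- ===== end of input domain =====

-- B strips the leading run with lstrip and rejects when the suffix has more than one distinct
-- character (set cardinality), instead of A's current-value/changed-flag scan (idiomatic; same cost,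
-- return value only).

-- ===== PORT A =====
-- rev_dirs = {'n': 's', 'e': 'w', 'w': 'e', 's': 'n'}
def revDirsA : PySem.Dict Char Char :=
  PySem.Dict.ofList [('n', 's'), ('e', 'w'), ('w', 'e'), ('s', 'n')]

-- return seq[0] != rev_dirs[seq[-1]]   (none = KeyError/IndexError, excluded by Pre_)
def finalA (seq : String) : Bool :=
  match PySem.Str.pyGet? seq 0, PySem.Str.pyGet? seq (-1) with
  | some h, some l =>
    match revDirsA.get? l with
    | some r => decide (h ≠ r)
    | none => false
  | _, _ => false

-- the 'for c in seq' loop with state x, changed; early 'return False'; final statement in the base case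
def loopA (seq : String) (x : Char) (changed : Bool) : List Char → Bool
  | [] => finalA seq
  | c :: cs =>
    if c ≠ x then
      if changed then false
      else loopA seq c true cs
    else loopA seq x changed cs

def is_valid_seq (seq : String) : Bool :=
  if seq.toList.length ≤ 2 then true
  else
    match PySem.Str.pyGet? seq 0 with
    | some x0 => loopA seq x0 false seq.toList
    | none => true  -- unreachable: length > 2

-- ===== PORT B =====
def revDirsB : PySem.Dict Char Char :=
  PySem.Dict.ofList [('n', 's'), ('e', 'w'), ('w', 'e'), ('s', 'n')]

-- hand port of seq.lstrip(seq[0]) for a SINGLE-character strip argument: drop that character from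
-- the left (exact: Python strips leading characters that occur in the one-char argument string)
def stripLead (x : Char) : List Char → List Char
  | [] => []
  | c :: cs => if c = x then stripLead x cs else c :: cs

-- return seq[0] != rev_dirs[seq[-1]]
def finalB (seq : String) : Bool :=
  match PySem.Str.pyGet? seq 0, PySem.Str.pyGet? seq (-1) with
  | some h, some l =>
    match revDirsB.get? l with
    | some r => decide (h ≠ r)
    | none => false
  | _, _ => false

def is_valid_seq_alt (seq : String) : Bool :=
  if seq.toList.length ≤ 2 then true
  else
    match PySem.Str.pyGet? seq 0 with
    | some h =>
      let tail := stripLead h seq.toList          -- tail = seq.lstrip(seq[0])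
      if (PySem.Set.ofList tail).length > 1 then false   -- len(set(tail)) > 1
      else finalB seq
    | none => true  -- unreachable: length > 2

-- ===== PRECONDITION & SPEC =====
-- Pre_ excludes exactly the inputs on which Python A raises KeyError: length > 2, at most one
-- direction change (so the final lookup is reached), and a last character that is not one of the
-- four direction characters.
def Pre_is_valid_seq (seq : String) : Prop :=
  seq.toList.length ≤ 2 ∨
  (seq.toList.getLast? = some 'n' ∨ seq.toList.getLast? = some 'e' ∨
   seq.toList.getLast? = some 'w' ∨ seq.toList.getLast? = some 's') ∨
  2 ≤ (seq.toList.zip seq.toList.tail).countP (fun p => decide (p.1 ≠ p.2))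
instance (seq : String) : Decidable (Pre_is_valid_seq seq) := by unfold Pre_is_valid_seq; infer_instance

def pvWitness_is_valid_seq : String := "nnee"

def Spec_is_valid_seq (seq : String) (out : Bool) : Prop := out = is_valid_seq_alt seq
instance (seq : String) (out : Bool) : Decidable (Spec_is_valid_seq seq out) := by unfold Spec_is_valid_seq; infer_instance

-- ===== CLAIM (what is proved, stated in full; the proofs are below) =====
def Claim_equal_is_valid_seq : Prop := ∀ (seq : String), Dom_is_valid_seq seq → Pre_is_valid_seq seq → Spec_is_valid_seq seq (is_valid_seq seq)

-- ===== LEMMAS AND PROOFS =====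

-- number of changes A's scan would record while traversing cs with current value x
def chg (x : Char) : List Char → Nat
  | [] => 0
  | c :: cs => if c ≠ x then 1 + chg c cs else chg x cs

theorem loopA_true_eq (seq : String) : ∀ (cs : List Char) (x : Char),
    loopA seq x true cs = if chg x cs = 0 then finalA seq else false := by
  intro cs
  induction cs with
  | nil => intro x; simp [loopA, chg]
  | cons c cs ih =>
    intro x
    by_cases h : c = x
    · subst h; simp [loopA, chg, ih]
    · simp [loopA, chg, h]

theorem loopA_false_eq (seq : String) : ∀ (cs : List Char) (x : Char),
    loopA seq x false cs = if chg x cs ≤ 1 then finalA seq else false := by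
  intro cs
  induction cs with
  | nil => intro x; simp [loopA, chg]
  | cons c cs ih =>
    intro x
    by_cases h : c = x
    · subst h; simp [loopA, chg, ih]
    · have hc : loopA seq x false (c :: cs) = loopA seq c true cs := by simp [loopA, h]
      have hchg : chg x (c :: cs) = 1 + chg c cs := by simp [chg, h]
      rw [hc, hchg, loopA_true_eq seq cs c]
      by_cases h0 : chg c cs = 0
      · simp [h0]
      · rw [if_neg h0, if_neg (by omega)]

theorem chg_zero_iff (x : Char) : ∀ (cs : List Char), chg x cs = 0 ↔ ∀ a ∈ cs, a = x := by
  intro cs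
  induction cs generalizing x with
  | nil => simp [chg]
  | cons c cs ih =>
    by_cases h : c = x
    · subst h; simp [chg, ih]
    · simp [chg, h]

theorem foldl_add_const (c : Char) : ∀ (cs : List Char), (∀ a ∈ cs, a = c) →
    cs.foldl PySem.Set.add [c] = [c] := by
  intro cs
  induction cs with
  | nil => intro _; rfl
  | cons b cs ih =>
    intro h
    have hb : b = c := h b (by simp)
    subst hb
    have : PySem.Set.add [b] b = [b] := by
      simp [PySem.Set.add, PySem.Set.contains]
    simp only [List.foldl_cons, this]
    exact ih (fun a ha => h a (by simp [ha]))

theorem setLen_cons_le_one_iff (c : Char) (cs : List Char) :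
    (PySem.Set.ofList (c :: cs)).length ≤ 1 ↔ ∀ a ∈ cs, a = c := by
  constructor
  · intro hlen a ha
    have hmem : ∀ b, b ∈ c :: cs → b ∈ PySem.Set.ofList (c :: cs) := by
      intro b hb; exact (PySem.Set.mem_ofList _ _).2 hb
    have hc := hmem c (by simp)
    have ha' := hmem a (by simp [ha])
    match hs : PySem.Set.ofList (c :: cs) with
    | [] => rw [hs] at hc; simp at hc
    | [d] =>
      rw [hs] at hc ha'
      simp at hc ha'
      rw [ha', ← hc]
    | d :: e :: t => rw [hs] at hlen; simp at hlen
  · intro h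
    have h1 : PySem.Set.ofList (c :: cs) = (c :: cs).foldl PySem.Set.add [] :=
      PySem.Set.ofList_eq_foldl _
    have h2 : PySem.Set.add ([] : List Char) c = [c] := rfl
    rw [h1]
    simp only [List.foldl_cons, h2]
    rw [foldl_add_const c cs h]
    simp

theorem chg_le_one_iff (x : Char) : ∀ (cs : List Char),
    chg x cs ≤ 1 ↔ (PySem.Set.ofList (stripLead x cs)).length ≤ 1 := by
  intro cs
  induction cs generalizing x with
  | nil => simp [chg, stripLead, PySem.Set.ofList]
  | cons c cs ih =>
    by_cases h : c = x
    · subst h; simp [chg, stripLead, ih]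
    · have h1 : chg x (c :: cs) = 1 + chg c cs := by simp [chg, h]
      have h2 : stripLead x (c :: cs) = c :: cs := by simp [stripLead, h]
      rw [h1, h2, setLen_cons_le_one_iff, ← chg_zero_iff]
      omega

theorem finalA_eq_finalB (seq : String) : finalA seq = finalB seq := rfl

-- ===== VERDICT (by name: the statement is the Claim_ definition above) =====
theorem is_valid_seq_spec : Claim_equal_is_valid_seq := by
  intro seq _ _
  unfold Spec_is_valid_seq is_valid_seq is_valid_seq_alt
  by_cases hlen : seq.toList.length ≤ 2
  · rw [if_pos hlen, if_pos hlen]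
  · rw [if_neg hlen, if_neg hlen]
    obtain ⟨c0, rest, hl⟩ : ∃ c0 rest, seq.toList = c0 :: rest := by
      cases h : seq.toList with
      | nil => rw [h] at hlen; simp at hlen
      | cons a b => exact ⟨a, b, rfl⟩
    rw [hl]
    have h0 : PySem.Str.pyGet? seq 0 = some c0 := by
      simp [PySem.Str.pyGet?, hl]
    rw [h0]
    show loopA seq c0 false (c0 :: rest) =
      if (PySem.Set.ofList (stripLead c0 (c0 :: rest))).length > 1 then false else finalB seq
    have hloop : loopA seq c0 false (c0 :: rest) = loopA seq c0 false rest := by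
      simp [loopA]
    have hstrip : stripLead c0 (c0 :: rest) = stripLead c0 rest := by simp [stripLead]
    rw [hloop, loopA_false_eq seq rest c0, finalA_eq_finalB, hstrip]
    have hiff := chg_le_one_iff c0 rest
    by_cases hc : chg c0 rest ≤ 1
    · rw [if_pos hc, if_neg (by rw [hiff] at hc; omega)]
    · rw [if_neg hc, if_pos (by rw [hiff] at hc; omega)]
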